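-- pv_equiv track=rewrite | github.com/sean-galloway/RTLDesignSherpa | bin/cov_utils/scenario_coverage_postprocessor.py | normalize_scenario_id
-- ===== SOURCE A (Python) =====
-- def normalize_scenario_id(scenario_id: str) -> str:
--     """
--     Normalize scenario ID for comparison.
--
--     Handles variations like:
--     - REGBLK-AXI005 -> AXI005
--     - AXI-005 -> AXI005
--     - AXI005 -> AXI005
--     - SEQR-CMD-001 -> CMD001
--
--     Returns normalized form: PREFIX + NUMBER (no hyphens).
--     """
--     # Remove common prefixes (module-specific prefixes like REGBLK-, SEQR-, etc.)
--     # These are prefixes added for disambiguation in multi-module tests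
--     module_prefixes = [
--         'REGBLK-', 'SEQR-', 'DFS-', 'BCAST-', 'QUANT-', 'Q4BLK-',
--         'NOQCORE-', 'MACRO-', 'FUB-'
--     ]
--     result = scenario_id.upper()
--     for prefix in module_prefixes:
--         if result.startswith(prefix):
--             result = result[len(prefix):]
--             break
--
--     # Remove all hyphens and standardize
--     result = result.replace('-', '')
--
--     return result
-- ===== SOURCE B (Python) =====
-- _MODULE_TOKENS = {'REGBLK', 'SEQR', 'DFS', 'BCAST', 'QUANT', 'Q4BLK',
--                   'NOQCORE', 'MACRO', 'FUB'}
--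
-- def normalize_scenario_id(scenario_id: str) -> str:
--     """Normalize scenario ID: strip one known module prefix, drop hyphens."""
--     s = scenario_id.upper()
--     head, sep, tail = s.partition('-')
--     if sep and head in _MODULE_TOKENS:
--         s = tail
--     return s.replace('-', '')
-- ===== Notes on version B (the rewrite author's own statement) =====
-- stated objective: simpler
-- what changed: Replaces the nine-iteration startswith/slice prefix-scan loop with a single partition at the first hyphen plus one set-membership test of the leading token.
import Mathlib
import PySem

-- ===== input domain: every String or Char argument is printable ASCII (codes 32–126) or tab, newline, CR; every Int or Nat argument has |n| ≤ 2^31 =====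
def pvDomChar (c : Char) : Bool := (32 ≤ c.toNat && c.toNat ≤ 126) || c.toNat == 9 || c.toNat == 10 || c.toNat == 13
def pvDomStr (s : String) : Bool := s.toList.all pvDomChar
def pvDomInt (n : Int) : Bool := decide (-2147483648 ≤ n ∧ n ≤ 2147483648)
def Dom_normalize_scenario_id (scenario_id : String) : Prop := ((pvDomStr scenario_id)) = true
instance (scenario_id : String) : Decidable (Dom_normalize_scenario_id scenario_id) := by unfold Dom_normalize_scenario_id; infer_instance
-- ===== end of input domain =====

-- B replaces A's nine-iteration startswith/slice prefix-scan loop by one partition at the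
-- first hyphen plus a single set-membership test of the leading token (objective: simpler).

-- ===== PORT A =====
def pvModulePrefixes : List String :=
  ["REGBLK-", "SEQR-", "DFS-", "BCAST-", "QUANT-", "Q4BLK-", "NOQCORE-", "MACRO-", "FUB-"]

-- the 'for prefix in module_prefixes: … break' loop of A
def pvPrefixLoop : List String → String → String
  | [], r => r
  | p :: ps, r =>
    if PySem.Str.startswith r p then PySem.Str.slice r (some (PySem.Str.len p)) none
    else pvPrefixLoop ps r

def normalize_scenario_id (scenario_id : String) : String :=
  let result := PySem.Str.upper scenario_id
  let result := pvPrefixLoop pvModulePrefixes result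
  PySem.Str.replace result "-" ""

-- ===== PORT B =====
-- Python set literal _MODULE_TOKENS (PySem.Set String: the distinct elements)
def pvModuleTokens : List String :=
  ["REGBLK", "SEQR", "DFS", "BCAST", "QUANT", "Q4BLK", "NOQCORE", "MACRO", "FUB"]

def normalize_scenario_id_alt (scenario_id : String) : String :=
  let s := PySem.Str.upper scenario_id
  -- head, sep, tail = s.partition('-'): hand port on code points, exact for the 1-char separator
  let head := s.toList.takeWhile (fun c => c != '-')
  let sepTail := s.toList.dropWhile (fun c => c != '-')
  let s := if !sepTail.isEmpty && pvModuleTokens.contains (String.ofList head)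
           then String.ofList sepTail.tail else s
  PySem.Str.replace s "-" ""

-- ===== PRECONDITION & SPEC =====
def Spec_normalize_scenario_id (scenario_id : String) (out : String) : Prop := out = normalize_scenario_id_alt scenario_id
instance (scenario_id : String) (out : String) : Decidable (Spec_normalize_scenario_id scenario_id out) := by unfold Spec_normalize_scenario_id; infer_instance

-- ===== CLAIM (what is proved, stated in full; the proofs are below) =====
def Claim_equal_normalize_scenario_id : Prop := ∀ (scenario_id : String), Dom_normalize_scenario_id scenario_id → Spec_normalize_scenario_id scenario_id (normalize_scenario_id scenario_id)

-- ===== LEMMAS AND PROOFS =====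

-- a hyphen-free token followed by '-' is a prefix of cs iff the token is exactly the
-- part of cs before the first hyphen and cs does contain a hyphen
theorem pv_prefix_hyphen_iff (t : List Char) (cs : List Char) (h : '-' ∉ t) :
    (t ++ ['-']) <+: cs ↔
      (cs.takeWhile (fun c => c != '-') = t ∧ cs.dropWhile (fun c => c != '-') ≠ []) := by
  induction t generalizing cs with
  | nil =>
    cases cs with
    | nil => simp
    | cons c cs' =>
      by_cases hc : c = '-'
      · subst hc
        rw [List.takeWhile_cons_of_neg (p := fun c => c != '-') (by simp), List.dropWhile_cons_of_neg (p := fun c => c != '-') (by simp)]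
        simp [List.cons_prefix_cons]
      · have hb : (c != '-') = true := by simpa using hc
        rw [List.takeWhile_cons_of_pos (p := fun c => c != '-') hb, List.dropWhile_cons_of_pos (p := fun c => c != '-') hb]
        constructor
        · intro hp
          rcases List.cons_prefix_cons.mp hp with ⟨h1, _⟩
          exact absurd h1.symm hc
        · rintro ⟨h1, _⟩
          exact absurd h1 (by simp)
  | cons a t' ih =>
    have ha : a ≠ '-' := fun h' => h (h' ▸ List.mem_cons_self)
    have ht' : '-' ∉ t' := fun h' => h (List.mem_cons_of_mem _ h')
    cases cs with
    | nil => simp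
    | cons c cs' =>
      by_cases hca : c = a
      · subst hca
        have hcb : (c != '-') = true := by simpa using ha
        rw [List.takeWhile_cons_of_pos (p := fun c => c != '-') hcb, List.dropWhile_cons_of_pos (p := fun c => c != '-') hcb]
        constructor
        · intro hp
          rcases List.cons_prefix_cons.mp hp with ⟨_, h2⟩
          rcases (ih cs' ht').mp h2 with ⟨h3, h4⟩
          exact ⟨by rw [h3], h4⟩
        · rintro ⟨h1, h2⟩
          have h3 : List.takeWhile (fun c => c != '-') cs' = t' := by
            injection h1
          exact List.cons_prefix_cons.mpr ⟨rfl, (ih cs' ht').mpr ⟨h3, h2⟩⟩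
      · constructor
        · intro hp
          rcases List.cons_prefix_cons.mp hp with ⟨h1, _⟩
          exact absurd h1.symm hca
        · rintro ⟨h1, _⟩
          by_cases hch : c = '-'
          · rw [List.takeWhile_cons_of_neg (p := fun c => c != '-') (by simpa using hch)] at h1
            exact absurd h1.symm (List.cons_ne_nil a t')
          · rw [List.takeWhile_cons_of_pos (p := fun c => c != '-') (by simpa using hch)] at h1
            injection h1 with h1a _
            exact absurd h1a hca

-- A's startswith test against a literal 'TOKEN-' prefix, characterized
theorem pv_startswith_char (u p : String) (t : List Char)
    (hp : p.toList = t ++ ['-']) (h : '-' ∉ t) :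
    (PySem.Str.startswith u p = true) ↔
      (u.toList.takeWhile (fun c => c != '-') = t ∧
       u.toList.dropWhile (fun c => c != '-') ≠ []) := by
  rw [PySem.Str.startswith_eq, PySem.Chars.startswith_iff, hp]
  exact pv_prefix_hyphen_iff t u.toList h

-- A's slice after a matched prefix is the tail after the first hyphen
theorem pv_slice_after (u p : String) (t : List Char)
    (hp : p.toList = t ++ ['-'])
    (hx : u.toList.takeWhile (fun c => c != '-') = t) :
    PySem.Str.slice u (some (PySem.Str.len p)) none
      = String.ofList (u.toList.dropWhile (fun c => c != '-')).tail := by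
  rw [← String.toList_inj]
  have hlen : PySem.Str.len p = ((t.length + 1 : Nat) : Int) := by
    simp [PySem.Str.len, hp]
  rw [PySem.Str.toList_slice, PySem.Chars.slice_eq_listSlice, hlen,
    PySem.List.slice_from_natCast, String.toList_ofList]
  conv_lhs => rw [← List.takeWhile_append_dropWhile (p := fun c => c != '-') (l := u.toList)]
  rw [hx, List.drop_append]
  simp [List.drop_one]

-- the loop over the mapped token list computes B's partition-based branch
theorem pv_loop_map (ts : List String) (u : String)
    (h : ∀ t ∈ ts, '-' ∉ t.toList) :
    pvPrefixLoop (ts.map (fun t => t ++ "-")) u =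
      (if !(u.toList.dropWhile (fun c => c != '-')).isEmpty
          && ts.contains (String.ofList (u.toList.takeWhile (fun c => c != '-')))
       then String.ofList (u.toList.dropWhile (fun c => c != '-')).tail else u) := by
  induction ts with
  | nil => simp [pvPrefixLoop]
  | cons t ts ih =>
    have ht : '-' ∉ t.toList := h t List.mem_cons_self
    have hts : ∀ t' ∈ ts, '-' ∉ t'.toList := fun t' h' => h t' (List.mem_cons_of_mem _ h')
    have hp : (t ++ "-").toList = t.toList ++ ['-'] := by simp
    simp only [List.map_cons, pvPrefixLoop]
    by_cases hsw : PySem.Str.startswith u (t ++ "-") = true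
    · rcases (pv_startswith_char u (t ++ "-") t.toList hp ht).mp hsw with ⟨hx, hd⟩
      rw [if_pos hsw, pv_slice_after u (t ++ "-") t.toList hp hx, if_pos]
      rw [Bool.and_eq_true]
      constructor
      · simpa [List.isEmpty_iff] using hd
      · simp only [List.contains_cons, Bool.or_eq_true]
        left
        simp [hx]
    · rw [if_neg hsw, ih hts]
      have hnot : ¬ (u.toList.takeWhile (fun c => c != '-') = t.toList ∧
          u.toList.dropWhile (fun c => c != '-') ≠ []) :=
        fun hc => hsw ((pv_startswith_char u (t ++ "-") t.toList hp ht).mpr hc)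
      by_cases hd : (u.toList.dropWhile (fun c => c != '-')).isEmpty = true
      · simp [hd]
      · have hx : String.ofList (u.toList.takeWhile (fun c => c != '-')) ≠ t := by
          intro he
          apply hnot
          refine ⟨?_, by simpa [List.isEmpty_iff] using hd⟩
          rw [← String.toList_inj] at he
          simpa using he
        simp only [List.contains_cons]
        rw [beq_false_of_ne hx]
        simp

-- ===== VERDICT (by name: the statement is the Claim_ definition above) =====
theorem normalize_scenario_id_spec : Claim_equal_normalize_scenario_id := by
  intro s _
  unfold Spec_normalize_scenario_id normalize_scenario_id normalize_scenario_id_alt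
  have hmap : pvModulePrefixes = pvModuleTokens.map (fun t => t ++ "-") := by decide
  have htok : ∀ t ∈ pvModuleTokens, '-' ∉ t.toList := by decide
  simp only [hmap]
  rw [pv_loop_map pvModuleTokens (PySem.Str.upper s) htok]
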